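-- pv_equiv track=rewrite | github.com/jk182/chessProjects | functions.py | modifyFEN
-- ===== SOURCE A (Python) =====
-- def modifyFEN(fen: str) -> str:
--     """
--     This function takes a standard FEN string and removes the halfmove clock and the fullmove number
--     """
--     fenS = fen.split(' ')
--     if not fenS[-2].isnumeric():
--         return fen
--     modFen = fenS[0]
--     for s in fenS[1:-2]:
--         modFen = f'{modFen} {s}'
--     return modFen
-- ===== SOURCE B (Python) =====
-- def modifyFEN(fen: str) -> str:
--     last = fen.rfind(' ')
--     if last == -1:
--         return fen
--     prev = fen.rfind(' ', 0, last)
--     if not fen[prev + 1:last].isnumeric():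
--         return fen
--     return fen[:last] if prev == -1 else fen[:prev]
-- ===== Notes on version B (the rewrite author's own statement) =====
-- stated objective: simpler
-- what changed: A splits the whole FEN on spaces and rebuilds the prefix by folding a space-joined accumulator; B never splits: it locates the last two spaces with rfind, checks the field between them, and returns a single prefix slice.
import Mathlib
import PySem

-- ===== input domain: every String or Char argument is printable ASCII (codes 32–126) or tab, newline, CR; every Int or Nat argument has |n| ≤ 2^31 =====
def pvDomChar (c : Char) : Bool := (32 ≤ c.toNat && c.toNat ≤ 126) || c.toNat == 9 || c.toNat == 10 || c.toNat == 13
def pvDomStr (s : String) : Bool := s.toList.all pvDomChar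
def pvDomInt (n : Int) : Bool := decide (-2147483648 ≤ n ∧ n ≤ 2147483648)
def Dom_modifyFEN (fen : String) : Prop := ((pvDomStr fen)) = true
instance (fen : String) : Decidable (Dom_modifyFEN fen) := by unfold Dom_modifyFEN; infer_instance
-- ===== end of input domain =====

-- B replaces A's full split / rejoin by a right-to-left rfind scan with two slices (objective: simpler; return-value equivalence).

-- ===== PORT A =====
-- 'isnumeric' is ported as PySem strIsdigit: on the printable-ASCII domain the two Python predicates coincide (digits 0-9 only).
def modifyFEN (fen : String) : String :=
  let fenS := PySem.Chars.splitOn fen.toList [' ']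
  match PySem.List.pyGet? fenS (-2) with
  | none => fen     -- fenS[-2] raises IndexError in Python (fen has no space): excluded by Pre_
  | some f =>
    if !(PySem.Chars.strIsdigit f) then fen
    else
      String.ofList ((PySem.List.slice fenS (some 1) (some (-2))).foldl
        (fun m s => m ++ ' ' :: s) ((PySem.List.pyGet? fenS 0).getD []))

-- ===== PORT B =====
def modifyFEN_alt (fen : String) : String :=
  let last := PySem.Str.rfind fen " "
  if last == -1 then fen
  else
    let prev := PySem.Str.rfindFrom fen " " 0 (some last)
    if !(PySem.Str.strIsdigit (PySem.Str.slice fen (some (prev + 1)) (some last))) then fen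
    else if prev == -1 then PySem.Str.slice fen none (some last)
    else PySem.Str.slice fen none (some prev)

-- ===== PRECONDITION & SPEC =====
-- Pre_ excludes exactly the inputs with no space character, on which Python A raises IndexError (fen.split(' ') has one field).
def Pre_modifyFEN (fen : String) : Prop := PySem.Str.isIn " " fen = true
instance (fen : String) : Decidable (Pre_modifyFEN fen) := by unfold Pre_modifyFEN; infer_instance
def pvWitness_modifyFEN : String := "k 0 1"

def Spec_modifyFEN (fen : String) (out : String) : Prop := out = modifyFEN_alt fen
instance (fen : String) (out : String) : Decidable (Spec_modifyFEN fen out) := by unfold Spec_modifyFEN; infer_instance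

-- ===== CLAIM (what is proved, stated in full; the proofs are below) =====
def Claim_equal_modifyFEN : Prop := ∀ (fen : String), Dom_modifyFEN fen → Pre_modifyFEN fen → Spec_modifyFEN fen (modifyFEN fen)
-- ===== LEMMAS AND PROOFS =====

/-- Reference split-on-single-space, by structural recursion. -/
def splitSp : List Char → List (List Char)
  | [] => [[]]
  | c :: rest =>
    if c = ' ' then [] :: splitSp rest
    else
      match splitSp rest with
      | [] => [[c]]
      | p :: ps => (c :: p) :: ps

theorem splitSp_ne_nil (l : List Char) : splitSp l ≠ [] := by
  cases l with
  | nil => simp [splitSp]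
  | cons c rest =>
    simp only [splitSp]
    split
    · simp
    · split <;> simp

theorem splitOn_go_spec (fuel : Nat) (l cur : List Char) (acc : List (List Char))
    (h : l.length ≤ fuel) :
    PySem.Chars.splitOn.go [' '] fuel l cur acc =
      acc.reverse ++ (match splitSp l with
        | [] => []
        | p :: ps => (cur.reverse ++ p) :: ps) := by
  induction fuel generalizing l cur acc with
  | zero =>
    have hl : l = [] := List.eq_nil_of_length_eq_zero (Nat.le_zero.mp h)
    subst hl
    simp [PySem.Chars.splitOn.go, splitSp]
  | succ n ih =>
    cases l with
    | nil => simp [PySem.Chars.splitOn.go, splitSp]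
    | cons c rest =>
      rw [PySem.Chars.splitOn.go]
      by_cases hc : c = ' '
      · subst hc
        have hpre : List.isPrefixOf [' '] (' ' :: rest) = true := by
          simp [List.isPrefixOf]
        rw [if_pos hpre]
        simp only [List.length_singleton, List.drop_one, List.tail_cons]
        have hlen : rest.length ≤ n := by simpa using h
        rw [ih rest [] (List.reverse cur :: acc) hlen]
        rcases hsp : splitSp rest with _ | ⟨p, ps⟩
        · exact absurd hsp (splitSp_ne_nil rest)
        · simp [splitSp, hsp]
      · have hpre : List.isPrefixOf [' '] (c :: rest) = false := by
          simp [List.isPrefixOf]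
          exact fun h' => hc h'.symm
        rw [if_neg (by simp [hpre])]
        have hlen : rest.length ≤ n := by simpa using h
        rw [ih rest (c :: cur) acc hlen]
        rcases hsp : splitSp rest with _ | ⟨p, ps⟩
        · exact absurd hsp (splitSp_ne_nil rest)
        · simp [splitSp, hsp, hc]

theorem splitOn_eq_splitSp (cs : List Char) :
    PySem.Chars.splitOn cs [' '] = splitSp cs := by
  rw [PySem.Chars.splitOn, splitOn_go_spec cs.length.succ cs [] [] (Nat.le_succ _)]
  rcases hsp : splitSp cs with _ | ⟨p, ps⟩
  · exact absurd hsp (splitSp_ne_nil cs)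
  · simp

theorem splitSp_spaceFree {v : List Char} (hv : ∀ c ∈ v, c ≠ ' ') : splitSp v = [v] := by
  induction v with
  | nil => simp [splitSp]
  | cons c rest ih =>
    have hc : c ≠ ' ' := hv c (by simp)
    have : splitSp rest = [rest] := ih fun x hx => hv x (by simp [hx])
    simp [splitSp, hc, this]

theorem splitSp_append_space {v : List Char} (hv : ∀ c ∈ v, c ≠ ' ') (u : List Char) :
    splitSp (u ++ ' ' :: v) = splitSp u ++ [v] := by
  induction u with
  | nil => simp [splitSp, splitSp_spaceFree hv]
  | cons c rest ih =>
    by_cases hc : c = ' '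
    · subst hc
      simp [splitSp, ih]
    · rcases hsp : splitSp rest with _ | ⟨p, ps⟩
      · exact absurd hsp (splitSp_ne_nil rest)
      · have : splitSp (rest ++ ' ' :: v) = (p :: ps) ++ [v] := by rw [ih, hsp]
        simp [splitSp, hc, this, hsp]


theorem joinSp (u : List Char) (q : List Char) (qs : List (List Char)) (h : splitSp u = q :: qs) :
    q ++ qs.flatMap (fun s => ' ' :: s) = u := by
  induction u generalizing q qs with
  | nil =>
    simp only [splitSp] at h
    injection h with h1 h2
    subst h1; subst h2; simp
  | cons c rest ih =>
    rcases hsp : splitSp rest with _ | ⟨p, ps⟩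
    · exact absurd hsp (splitSp_ne_nil rest)
    · by_cases hc : c = ' '
      · subst hc
        simp only [splitSp, hsp] at h
        injection h with h1 h2
        subst h1; subst h2
        simpa using ih p ps hsp
      · simp only [splitSp, if_neg hc, hsp] at h
        injection h with h1 h2
        subst h1; subst h2
        simpa using ih p ps hsp

theorem exists_last_space {cs : List Char} (h : ' ' ∈ cs) :
    ∃ u v, cs = u ++ ' ' :: v ∧ ∀ c ∈ v, c ≠ ' ' := by
  induction cs with
  | nil => cases h
  | cons c rest ih =>
    by_cases hr : ' ' ∈ rest
    · obtain ⟨u, v, hcs, hv⟩ := ih hr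
      exact ⟨c :: u, v, by simp [hcs], hv⟩
    · have hc : c = ' ' := by
        rcases List.mem_cons.mp h with h' | h'
        · exact h'.symm
        · exact absurd h' hr
      exact ⟨[], rest, by simp [hc], fun x hx hx' => hr (hx' ▸ hx)⟩

theorem prefix_false {v : List Char} (hv : ∀ c ∈ v, c ≠ ' ') (i : Nat) :
    List.isPrefixOf [' '] (v.drop i) = false := by
  rcases hd : v.drop i with _ | ⟨c, t⟩
  · simp [List.isPrefixOf]
  · have hc : c ∈ v := List.drop_subset i v (hd ▸ List.mem_cons_self)
    simp [List.isPrefixOf]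
    exact fun h => (hv c hc) h.symm

theorem rfind_go_spaceFree {v : List Char} (hv : ∀ c ∈ v, c ≠ ' ') (j : Nat) :
    PySem.Chars.rfind.go v [' '] j = -1 := by
  induction j with
  | zero =>
    have h0 := prefix_false hv 0
    rw [List.drop_zero] at h0
    simp [PySem.Chars.rfind.go, h0]
  | succ n ih => simp [PySem.Chars.rfind.go, prefix_false hv (n + 1), ih]

theorem rfind_spaceFree {v : List Char} (hv : ∀ c ∈ v, c ≠ ' ') :
    PySem.Chars.rfind v [' '] = -1 := rfind_go_spaceFree hv v.length

theorem rfind_go_append {u v : List Char} (hv : ∀ c ∈ v, c ≠ ' ') (j : Nat)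
    (hj : u.length ≤ j) :
    PySem.Chars.rfind.go (u ++ ' ' :: v) [' '] j = (u.length : Int) := by
  have hdrop : ∀ i : Nat, u.length < i →
      List.isPrefixOf [' '] ((u ++ ' ' :: v).drop i) = false := by
    intro i hi
    have hrw : (u ++ ' ' :: v).drop i = v.drop (i - (u.length + 1)) := by
      have h1 : u ++ ' ' :: v = (u ++ [' ']) ++ v := by simp
      rw [h1, List.drop_append]
      have h2 : (u ++ [' ']).drop i = [] := by
        apply List.drop_eq_nil_of_le
        simp; omega
      rw [h2, List.nil_append]
      simp
    rw [hrw]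
    exact prefix_false hv _
  have hat : List.isPrefixOf [' '] ((u ++ ' ' :: v).drop u.length) = true := by
    rw [List.drop_left]
    simp [List.isPrefixOf]
  induction j with
  | zero =>
    have hu : u.length = 0 := Nat.le_zero.mp hj
    have hat0 : List.isPrefixOf [' '] (u ++ ' ' :: v) = true := by
      have := hat
      rw [hu, List.drop_zero] at this
      exact this
    simp [PySem.Chars.rfind.go, hat0, hu]
  | succ n ih =>
    rcases Nat.eq_or_lt_of_le hj with heq | hlt
    · have hat' : List.isPrefixOf [' '] ((u ++ ' ' :: v).drop (n + 1)) = true := by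
        rw [← heq]; exact hat
      simp [PySem.Chars.rfind.go, heq]
    · have hf := hdrop (n + 1) (by omega)
      simp only [PySem.Chars.rfind.go, hf]
      simp only [Bool.false_eq_true, if_false]
      exact ih (by omega)

theorem rfind_append {u v : List Char} (hv : ∀ c ∈ v, c ≠ ' ') :
    PySem.Chars.rfind (u ++ ' ' :: v) [' '] = (u.length : Int) := by
  rw [PySem.Chars.rfind]
  exact rfind_go_append hv _ (by simp [List.length_append])

theorem rfindFrom_take (cs : List Char) (k : Nat) (hk : k ≤ cs.length) :
    PySem.Chars.rfindFrom cs [' '] 0 (some (k : Int)) =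
      PySem.Chars.rfind (cs.take k) [' '] := by
  unfold PySem.Chars.rfindFrom
  have h1 : ¬ ((cs.length : Int) < (k : Int)) := by exact_mod_cast Nat.not_lt.mpr hk
  have h2 : ¬ ((k : Int) < 0) := Int.not_lt.mpr (Int.natCast_nonneg k)
  simp only [h1, h2, if_false, if_neg (by omega : ¬ (0:Int) < 0)]
  simp only [Int.toNat_natCast, Int.toNat_zero, List.drop_zero, zero_add]
  split
  next h => exact h.symm
  next => rfl

theorem pyGet?_append_neg_two {α : Type} (l : List α) (w v : α) :
    PySem.List.pyGet? (l ++ [w, v]) (-2) = some w := by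
  unfold PySem.List.pyGet? PySem.List.pyIdx?
  have hlen : (l ++ [w, v]).length = l.length + 2 := by simp
  rw [hlen]
  rw [if_neg (by omega : ¬ (0:Int) ≤ -2)]
  rw [if_pos (by push_cast; omega : -((l.length + 2 : Nat) : Int) ≤ -2)]
  have h3 : l.length + 2 - (-(-2:Int)).toNat = l.length := by omega
  rw [h3]
  simp only [Option.bind]
  rw [List.getElem?_append_right (le_refl l.length)]
  simp

theorem slice_two {α : Type} (w v : α) :
    PySem.List.slice [w, v] (some 1) (some (-2)) = [] := by
  simp [PySem.List.slice, PySem.List.clampIdx]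

theorem slice_mid {α : Type} (q : α) (qs : List α) (w v : α) :
    PySem.List.slice (q :: (qs ++ [w, v])) (some 1) (some (-2)) = qs := by
  simp only [PySem.List.slice, PySem.List.clampIdx]
  norm_num
  rw [if_neg (by omega : ¬ ((qs.length : Int) + 2 ≤ 0))]
  have hb : ((qs.length : Int) + 2 + 1 + -2).toNat = qs.length + 1 := by omega
  rw [hb]
  simp [List.take_left']

theorem foldl_join (l : List (List Char)) (m : List Char) :
    l.foldl (fun m s => m ++ ' ' :: s) m = m ++ l.flatMap (fun s => ' ' :: s) := by
  induction l generalizing m with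
  | nil => simp
  | cons x xs ih => simp [ih, List.append_assoc]

theorem space_toList : (" " : String).toList = [' '] := by decide

theorem modifyFEN_spec : Claim_equal_modifyFEN := by
  intro fen _ hpre
  unfold Spec_modifyFEN
  have hmem : ' ' ∈ fen.toList := by
    unfold Pre_modifyFEN at hpre
    rw [PySem.Str.isIn_iff_infix, space_toList] at hpre
    exact List.singleton_sublist.mp hpre.sublist
  obtain ⟨u, v, hcs, hv⟩ := exists_last_space hmem
  have hlast : PySem.Str.rfind fen " " = ((u.length : Nat) : Int) := by
    rw [PySem.Str.rfind_eq, space_toList, hcs, rfind_append hv]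
  have hne1 : (((u.length : Nat) : Int) == -1) = false := by simp
  have htake : fen.toList.take u.length = u := by rw [hcs, List.take_left]
  have hprev0 : PySem.Str.rfindFrom fen " " 0 (some ((u.length : Nat) : Int)) =
      PySem.Chars.rfind u [' '] := by
    rw [PySem.Str.rfindFrom_eq, space_toList,
      rfindFrom_take fen.toList u.length (by rw [hcs]; simp), htake]
  by_cases hmu : ' ' ∈ u
  · -- at least two spaces: u = u' ++ ' ' :: w with w space-free
    obtain ⟨u', w, hu, hw⟩ := exists_last_space hmu
    rcases hq : splitSp u' with _ | ⟨q, qs⟩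
    · exact absurd hq (splitSp_ne_nil u')
    have hps : splitSp fen.toList = (q :: qs) ++ [w, v] := by
      rw [hcs, splitSp_append_space hv, hu, splitSp_append_space hw, hq]
      simp
    have hprev : PySem.Str.rfindFrom fen " " 0 (some ((u.length : Nat) : Int)) =
        ((u'.length : Nat) : Int) := by
      rw [hprev0, hu, rfind_append hw]
    have hne2 : (((u'.length : Nat) : Int) == -1) = false := by simp
    have hcs2 : fen.toList = (u' ++ [' ']) ++ (w ++ ' ' :: v) := by
      rw [hcs, hu]; simp
    have hfield : (PySem.Str.slice fen (some (((u'.length : Nat) : Int) + 1))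
        (some ((u.length : Nat) : Int))).toList = w := by
      rw [PySem.Str.toList_slice, PySem.Chars.slice_eq_listSlice]
      rw [show ((u'.length : Nat) : Int) + 1 = (((u'.length + 1 : Nat)) : Int) by push_cast; ring]
      rw [PySem.List.slice_natCast]
      rw [hcs2, List.drop_left' (by simp)]
      have hlen : u.length - (u'.length + 1) = w.length := by
        rw [hu]; simp [List.length_append]; omega
      rw [hlen, List.take_left]
    have hB0 : modifyFEN_alt fen = (if !(PySem.Chars.strIsdigit w) then fen
        else PySem.Str.slice fen none (some ((u'.length : Nat) : Int))) := by
      unfold modifyFEN_alt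
      simp only [hlast, hne1, hprev, hne2, Bool.false_eq_true, if_false,
        PySem.Str.strIsdigit_eq, hfield]
    have hA0 : modifyFEN fen = (if !(PySem.Chars.strIsdigit w) then fen
        else String.ofList u') := by
      unfold modifyFEN
      simp only [splitOn_eq_splitSp, hps]
      rw [pyGet?_append_neg_two]
      simp only [List.cons_append, slice_mid, PySem.List.pyGet?_zero_cons, Option.getD_some,
        foldl_join, joinSp u' q qs hq]
    rw [hA0, hB0]
    by_cases hd : PySem.Chars.strIsdigit w = true
    · simp only [hd, Bool.not_true, Bool.false_eq_true, if_false]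
      rw [← String.toList_inj, String.toList_ofList, PySem.Str.toList_slice,
        PySem.Chars.slice_eq_listSlice, PySem.List.slice_to _ (Int.natCast_nonneg _),
        Int.toNat_natCast, hcs2, List.append_assoc]
      exact (List.take_left ..).symm
    · rw [Bool.not_eq_true] at hd
      simp [hd]
  · -- exactly one space: the split is [u, v]
    have hu : ∀ c ∈ u, c ≠ ' ' := fun c hc h => hmu (h ▸ hc)
    have hps : splitSp fen.toList = ([] : List (List Char)) ++ [u, v] := by
      rw [hcs, splitSp_append_space hv, splitSp_spaceFree hu]
      simp
    have hprev : PySem.Str.rfindFrom fen " " 0 (some ((u.length : Nat) : Int)) = -1 := by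
      rw [hprev0, rfind_spaceFree hu]
    have hfield : (PySem.Str.slice fen (some ((-1 : Int) + 1))
        (some ((u.length : Nat) : Int))).toList = u := by
      rw [PySem.Str.toList_slice, PySem.Chars.slice_eq_listSlice]
      rw [show ((-1 : Int) + 1) = (((0 : Nat)) : Int) by norm_num]
      rw [PySem.List.slice_natCast]
      simpa using htake
    have hB0 : modifyFEN_alt fen = (if !(PySem.Chars.strIsdigit u) then fen
        else PySem.Str.slice fen none (some ((u.length : Nat) : Int))) := by
      unfold modifyFEN_alt
      simp only [hlast, hne1, hprev, Bool.false_eq_true, if_false,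
        PySem.Str.strIsdigit_eq, hfield]
      simp
    have hA0 : modifyFEN fen = (if !(PySem.Chars.strIsdigit u) then fen
        else String.ofList u) := by
      unfold modifyFEN
      simp only [splitOn_eq_splitSp, hps]
      rw [pyGet?_append_neg_two]
      simp only [List.nil_append, slice_two, PySem.List.pyGet?_zero_cons, Option.getD_some,
        List.foldl_nil]
    rw [hA0, hB0]
    by_cases hd : PySem.Chars.strIsdigit u = true
    · simp only [hd, Bool.not_true, Bool.false_eq_true, if_false]
      rw [← String.toList_inj, String.toList_ofList, PySem.Str.toList_slice,
        PySem.Chars.slice_eq_listSlice, PySem.List.slice_to _ (Int.natCast_nonneg _),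
        Int.toNat_natCast, htake]
    · rw [Bool.not_eq_true] at hd
      simp [hd]
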